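/- GENERATED by farm/mkstatement.py from design/units.tsv (unit `DGifDecompressInput.P`) and the assertions of Gif/Spec/Seg_DGifDecompressInput.lean — do not edit.
   THE STATEMENT of the proof unit `DGifDecompressInput.P`: segment P of `DGifDecompressInput` (16 instructions; entries 0x1067a0;
   exits 0x1067eb; ranges 0x1067a0-0x1067eb)
   takes each of its entry assertions to one of its exit assertions (`Gif.Spec.DGifDecompressInput.SegP`), given the contracts of its callees.
   What the names mean: ProgX/Base/Spec/Basic.lean (the shared hypotheses), Gif/Spec/Seg_DGifDecompressInput.lean (the assertions). The theorem to prove: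
   `theorem DGifDecompressInput_P_ok : Gif.Spec.DGifDecompressInput_P.Statement`. -/
import Gif.Code
import Gif.Dec.All
import Gif.Labels
import Gif.Spec.Seg_DGifDecompressInput
namespace Gif.Spec.DGifDecompressInput_P
open X86 X86.User Asan

/-- The statement of unit `DGifDecompressInput.P`. -/
def Statement : Prop :=
  ∀ (Lay : Layout) (_hLay : Lay.hi = 0x1000000) (μ : Microarch) (_hμ : UserX.MicroOK μ) (u₀ : State)
    (_hcode : HasCodeNat Lay u₀ Gif.L.DGifDecompressInput.entry Gif.Code.code_DGifDecompressInput.nat Gif.L.DGifDecompressInput.size),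
    Gif.Spec.DGifDecompressInput.SegP Lay μ u₀

end Gif.Spec.DGifDecompressInput_P
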